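-- pv_equiv track=rewrite | github.com/jhparkerb/thebooker | pipeline/scrapers/amc.py | _parse_format_recliner
-- ===== SOURCE A (Python) =====
-- FORMAT_CODES = {
--     "IMAX":       "IMAX",
--     "PRIME":      "PRIME",
--     "DOLBY":      "DOLBY",
--     "PLF":        "IMAX",    # Premium Large Format (treat as IMAX)
--     "3D":         "3D",
-- }
--
-- RECLINER_CODES = {"RESERVE", "RECLINE", "DINE-IN", "PRIME", "DOLBY"}
--
-- def _parse_format_recliner(attributes: list[dict]) -> tuple[str, bool]:
--     fmt = "STANDARD"
--     recliner = False
--     for attr in attributes: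
--         code = attr.get("code", "").upper()
--         if code in FORMAT_CODES:
--             fmt = FORMAT_CODES[code]
--         if code in RECLINER_CODES:
--             recliner = True
--     return fmt, recliner
-- ===== SOURCE B (Python) =====
-- FORMAT_CODES = {
--     "IMAX":       "IMAX",
--     "PRIME":      "PRIME",
--     "DOLBY":      "DOLBY",
--     "PLF":        "IMAX",    # Premium Large Format (treat as IMAX)
--     "3D":         "3D",
-- }
--
-- RECLINER_CODES = {"RESERVE", "RECLINE", "DINE-IN", "PRIME", "DOLBY"}
--
-- def _parse_format_recliner(attributes: list[dict]) -> tuple[str, bool]: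
--     codes = [attr.get("code", "").upper() for attr in attributes]
--     recliner = any(c in RECLINER_CODES for c in codes)
--     fmt = "STANDARD"
--     for c in reversed(codes):
--         if c in FORMAT_CODES:
--             fmt = FORMAT_CODES[c]
--             break
--     return fmt, recliner
-- ===== Notes on version B (the rewrite author's own statement) =====
-- stated objective: alternative
-- what changed: Replaces the single stateful loop (which keeps overwriting fmt and recliner) by two purpose-specific passes over a normalized code list: recliner is one any() membership test, and fmt is an early-exit backward scan that returns at the first format code (preserving last-format-wins).
import Mathlib
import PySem

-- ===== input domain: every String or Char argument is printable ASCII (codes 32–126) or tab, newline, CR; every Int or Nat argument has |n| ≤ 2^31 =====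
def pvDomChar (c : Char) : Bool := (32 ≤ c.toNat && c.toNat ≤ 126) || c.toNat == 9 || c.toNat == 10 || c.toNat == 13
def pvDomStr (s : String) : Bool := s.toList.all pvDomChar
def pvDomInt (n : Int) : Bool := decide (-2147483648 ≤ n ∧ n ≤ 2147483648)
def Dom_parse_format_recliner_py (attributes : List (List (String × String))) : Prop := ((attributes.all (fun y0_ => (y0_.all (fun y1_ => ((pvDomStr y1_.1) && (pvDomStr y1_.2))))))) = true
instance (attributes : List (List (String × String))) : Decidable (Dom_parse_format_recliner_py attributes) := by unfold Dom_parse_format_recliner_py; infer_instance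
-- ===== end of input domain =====

-- B replaces A's single stateful loop by two purpose-specific passes over a normalized code list:
-- recliner as one any()-membership test and fmt as an early-exit backward scan (alternative decomposition, same cost).

-- shared module constants
def pvFormatCodes : PySem.Dict String String :=
  PySem.Dict.ofList [("IMAX", "IMAX"), ("PRIME", "PRIME"), ("DOLBY", "DOLBY"), ("PLF", "IMAX"), ("3D", "3D")]

def pvReclinerCodes : List String := ["RESERVE", "RECLINE", "DINE-IN", "PRIME", "DOLBY"]

-- attr.get("code", "").upper()  (first-match lookup on the association list, as Python dict.get)
def pvCodeOf (attr : List (String × String)) : String :=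
  PySem.Str.upper ((PySem.Dict.mk attr).getD "code" "")

-- ===== PORT A =====
def pvAStep (st : String × Bool) (attr : List (String × String)) : String × Bool :=
  let code := pvCodeOf attr
  let fmt := if pvFormatCodes.contains code then pvFormatCodes.getD code st.1 else st.1
  let recliner := if code ∈ pvReclinerCodes then true else st.2
  (fmt, recliner)

def parse_format_recliner_py (attributes : List (List (String × String))) : String × Bool :=
  attributes.foldl pvAStep ("STANDARD", false)

-- ===== PORT B =====
-- backward scan with early exit: first format hit in the given list, default "STANDARD"
def pvFmtScan : List String → String
  | [] => "STANDARD"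
  | c :: rest =>
    match pvFormatCodes.get? c with
    | some v => v
    | none => pvFmtScan rest

def parse_format_recliner_py_alt (attributes : List (List (String × String))) : String × Bool :=
  let codes := attributes.map pvCodeOf
  let recliner := codes.any (fun c => c ∈ pvReclinerCodes)
  (pvFmtScan codes.reverse, recliner)

-- ===== PRECONDITION & SPEC =====
def Spec_parse_format_recliner_py (attributes : List (List (String × String))) (out : String × Bool) : Prop := out = parse_format_recliner_py_alt attributes
instance (attributes : List (List (String × String))) (out : String × Bool) : Decidable (Spec_parse_format_recliner_py attributes out) := by unfold Spec_parse_format_recliner_py; infer_instance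

-- ===== CLAIM (what is proved, stated in full; the proofs are below) =====
def Claim_equal_parse_format_recliner_py : Prop := ∀ (attributes : List (List (String × String))), Dom_parse_format_recliner_py attributes → Spec_parse_format_recliner_py attributes (parse_format_recliner_py attributes)

-- ===== LEMMAS AND PROOFS =====

-- the fmt component of A's fold, seen on the code list alone
def pvFoldFmt (cs : List String) (f0 : String) : String :=
  cs.foldl (fun f c => if pvFormatCodes.contains c then pvFormatCodes.getD c f else f) f0

theorem pvFold_split (l : List (List (String × String))) (st : String × Bool) :
    l.foldl pvAStep st =
      (pvFoldFmt (l.map pvCodeOf) st.1,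
       st.2 || (l.map pvCodeOf).any (fun c => c ∈ pvReclinerCodes)) := by
  induction l generalizing st with
  | nil => simp [pvFoldFmt]
  | cons a t ih =>
    simp only [List.foldl_cons, List.map_cons, List.any_cons, ih, pvAStep, pvFoldFmt]
    by_cases h : pvCodeOf a ∈ pvReclinerCodes <;> simp [h]

theorem pvFoldFmt_eq_scan (cs : List String) :
    pvFoldFmt cs "STANDARD" = pvFmtScan cs.reverse := by
  induction cs using List.reverseRecOn with
  | nil => rfl
  | append_singleton t c ih =>
    simp only [pvFoldFmt, List.foldl_append, List.foldl_cons, List.foldl_nil,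
      List.reverse_append, List.reverse_singleton, List.singleton_append, pvFmtScan]
    rw [PySem.Dict.contains_eq_isSome_get?, PySem.Dict.getD_eq_get?_getD]
    cases h : pvFormatCodes.get? c with
    | none => simpa [h] using ih
    | some v => simp

-- ===== VERDICT (by name: the statement is the Claim_ definition above) =====
theorem parse_format_recliner_py_spec : Claim_equal_parse_format_recliner_py := by
  intro attributes _
  unfold Spec_parse_format_recliner_py parse_format_recliner_py parse_format_recliner_py_alt
  rw [pvFold_split, pvFoldFmt_eq_scan]
  rfl
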